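-- pv_equiv track=rewrite | github.com/DenisovPlay/ancia | backend/text_stream_utils.py | resolve_stream_delta
-- ===== SOURCE A (Python) =====
-- def resolve_stream_delta(payload_text: str, emitted_text: str) -> str:
--   current = str(payload_text or "")
--   if not current:
--     return ""
--   emitted = str(emitted_text or "")
--   if not emitted:
--     return current
--
--   # Cumulative mode: payload содержит весь текст ответа на текущем шаге.
--   if current.startswith(emitted):
--     return current[len(emitted):]
--
--   # Уже полученный дубликат/ретрай без новых токенов.
--   # Важно: проверяем только хвост. Поиск "вхождения где угодно" ломает
--   # поток (выкидывает валидные короткие токены вроде " и " или "на ").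
--   if emitted.endswith(current):
--     return ""
--
--   # Partial overlap mode: payload возвращает кусок с пересечением хвоста.
--   max_overlap = min(len(current), len(emitted))
--   for overlap in range(max_overlap, 0, -1):
--     if emitted.endswith(current[:overlap]):
--       return current[overlap:]
--
--   return current
-- ===== SOURCE B (Python) =====
-- def resolve_stream_delta(payload_text: str, emitted_text: str) -> str:
--     # Single forward pass over emitted_text, simulating the prefix-matching NFA of
--     # payload_text: `live` holds every length k such that the k-char prefix of
--     # payload_text equals the last k characters of emitted_text seen so far.
--     # After the pass, the largest surviving length is the overlap to strip.
--     current = payload_text or ""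
--     emitted = emitted_text or ""
--     live = set()
--     for ch in emitted:
--         nxt = {k + 1 for k in live if k < len(current) and current[k] == ch}
--         if current and current[0] == ch:
--             nxt.add(1)
--         live = nxt
--     return current[max(live, default=0):]
-- ===== Notes on version B (the rewrite author's own statement) =====
-- stated objective: alternative
-- what changed: B replaces A's branch cascade plus descending loop of emitted.endswith(current[:overlap]) substring comparisons by a single forward character pass over emitted_text that simulates the prefix-matching NFA of payload_text (maintaining the set of live prefix-match lengths) and strips the largest surviving length.
import Mathlib
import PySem

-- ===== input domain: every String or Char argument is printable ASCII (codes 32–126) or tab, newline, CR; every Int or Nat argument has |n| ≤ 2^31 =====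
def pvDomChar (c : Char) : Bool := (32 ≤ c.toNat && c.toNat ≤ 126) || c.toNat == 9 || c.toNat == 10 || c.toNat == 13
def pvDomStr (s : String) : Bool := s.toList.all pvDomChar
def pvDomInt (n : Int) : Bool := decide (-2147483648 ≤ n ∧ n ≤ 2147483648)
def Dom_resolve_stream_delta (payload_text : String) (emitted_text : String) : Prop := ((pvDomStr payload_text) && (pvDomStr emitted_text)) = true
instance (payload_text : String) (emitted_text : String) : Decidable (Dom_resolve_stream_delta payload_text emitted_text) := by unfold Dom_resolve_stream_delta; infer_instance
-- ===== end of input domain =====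

-- B replaces A's branch cascade plus descending endswith-scan over prefix lengths by a single
-- forward character pass over emitted_text simulating the prefix-matching NFA of payload_text
-- (a set of live match lengths), then strips the largest surviving length (alternative algorithm,
-- not claimed faster).

-- ===== PORT A =====
-- for overlap in range(max_overlap, 0, -1): if emitted.endswith(current[:overlap]): return current[overlap:]
-- (descending range loop as the obvious structural recursion on overlap; after the loop: return current)
def pvLoopA (current emitted : List Char) : Nat → List Char
  | 0 => current
  | k + 1 =>
    if PySem.Chars.endswith emitted (PySem.Chars.slice current none (some ((k + 1 : Nat) : Int))) then
      PySem.Chars.slice current (some ((k + 1 : Nat) : Int)) none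
    else pvLoopA current emitted k

def resolve_stream_delta (payload_text : String) (emitted_text : String) : String :=
  -- str(payload_text or "") is payload_text itself for a str argument (likewise emitted)
  let current := payload_text.toList
  if current = [] then ""
  else
    let emitted := emitted_text.toList
    if emitted = [] then String.ofList current
    else if PySem.Chars.startswith current emitted then
      String.ofList (PySem.Chars.slice current (some ((emitted.length : Nat) : Int)) none)
    else if PySem.Chars.endswith emitted current then ""
    else
      let max_overlap := min current.length emitted.length
      String.ofList (pvLoopA current emitted max_overlap)

-- ===== PORT B =====
-- loop body: nxt = {k + 1 for k in live if k < len(current) and current[k] == ch};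
--            if current and current[0] == ch: nxt.add(1);  live = nxt
def pvStep (current : List Char) (live : PySem.Set Int) (ch : Char) : PySem.Set Int :=
  let nxt := PySem.Set.ofList
    ((live.filter
        (fun k => decide (k < (current.length : Int)) && (PySem.List.pyGet? current k == some ch))).map
      (fun k => k + 1))
  if current ≠ [] ∧ PySem.List.pyGet? current 0 = some ch then PySem.Set.add nxt 1 else nxt

def resolve_stream_delta_alt (payload_text : String) (emitted_text : String) : String :=
  let current := payload_text.toList
  let emitted := emitted_text.toList
  -- for ch in emitted: live = step  (live starts as the empty set)
  let live := emitted.foldl (pvStep current) PySem.Set.empty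
  -- return current[max(live, default=0):]
  String.ofList (PySem.Chars.slice current (some (PySem.List.maxD live (fun k => k) 0)) none)

-- ===== PRECONDITION & SPEC =====
def Spec_resolve_stream_delta (payload_text : String) (emitted_text : String) (out : String) : Prop := out = resolve_stream_delta_alt payload_text emitted_text
instance (payload_text : String) (emitted_text : String) (out : String) : Decidable (Spec_resolve_stream_delta payload_text emitted_text out) := by unfold Spec_resolve_stream_delta; infer_instance

-- ===== CLAIM (what is proved, stated in full; the proofs are below) =====
def Claim_equal_resolve_stream_delta : Prop := ∀ (payload_text : String) (emitted_text : String), Dom_resolve_stream_delta payload_text emitted_text → Spec_resolve_stream_delta payload_text emitted_text (resolve_stream_delta payload_text emitted_text)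

-- ===== LEMMAS AND PROOFS =====

-- A's loop is a descending first-hit scan: it computes the greatest k ≤ n with
-- emitted.endswith(current[:k]) and drops it (k = 0 when none, dropping nothing).
theorem pvLoopA_eq (c e : List Char) (n : Nat) :
    pvLoopA c e n =
      c.drop (Nat.findGreatest (fun k => PySem.Chars.endswith e (c.take k) = true) n) := by
  induction n with
  | zero => simp [pvLoopA]
  | succ k ih =>
    rw [Nat.findGreatest_succ]
    simp only [pvLoopA, PySem.Chars.slice_eq_listSlice, PySem.List.slice_to_natCast,
      PySem.List.slice_from_natCast]
    split_ifs with h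
    · rfl
    · exact ih

-- A's whole body computes "drop the greatest overlap": the early branches are the
-- extreme cases of the same maximum.
theorem pvA_eq (p e : String) :
    resolve_stream_delta p e =
      String.ofList ((p.toList).drop
        (Nat.findGreatest (fun k => PySem.Chars.endswith e.toList ((p.toList).take k) = true)
          (min p.toList.length e.toList.length))) := by
  unfold resolve_stream_delta
  by_cases hc : p.toList = []
  · rw [if_pos hc, hc, List.drop_nil]
  by_cases he : e.toList = []
  · rw [if_neg hc, if_pos he, he]
    simp
  rw [if_neg hc, if_neg he]
  by_cases hs : PySem.Chars.startswith p.toList e.toList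
  · rw [if_pos hs]
    have hpre : e.toList <+: p.toList := (PySem.Chars.startswith_iff _ _).mp hs
    have hle : e.toList.length ≤ p.toList.length := hpre.length_le
    have hP : PySem.Chars.endswith e.toList ((p.toList).take e.toList.length) = true := by
      rw [← List.prefix_iff_eq_take.mp hpre, PySem.Chars.endswith_iff]
    rw [Nat.min_eq_right hle, Nat.findGreatest_eq hP,
      PySem.Chars.slice_eq_listSlice, PySem.List.slice_from_natCast]
  rw [if_neg hs]
  by_cases ht : PySem.Chars.endswith e.toList p.toList
  · rw [if_pos ht]
    have hsfx : p.toList <:+ e.toList := (PySem.Chars.endswith_iff _ _).mp ht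
    have hle : p.toList.length ≤ e.toList.length := hsfx.length_le
    have hP : PySem.Chars.endswith e.toList ((p.toList).take p.toList.length) = true := by
      rw [List.take_length, PySem.Chars.endswith_iff]
      exact hsfx
    rw [Nat.min_eq_left hle, Nat.findGreatest_eq hP, List.drop_length]
  rw [if_neg ht]
  exact congrArg String.ofList (pvLoopA_eq _ _ _)

-- the invariant property of B's live set after consuming e: the live match lengths
def pvQ (c e : List Char) (x : Int) : Prop :=
  ∃ n : Nat, x = (n : Int) ∧ 1 ≤ n ∧ n ≤ c.length ∧ n ≤ e.length ∧
    c.take n = e.drop (e.length - n)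

-- membership in one NFA step
theorem mem_pvStep (c : List Char) (live : PySem.Set Int) (ch : Char) (x : Int) :
    x ∈ pvStep c live ch ↔
      (∃ j ∈ live, j < (c.length : Int) ∧ PySem.List.pyGet? c j = some ch ∧ x = j + 1) ∨
      (c ≠ [] ∧ PySem.List.pyGet? c 0 = some ch ∧ x = 1) := by
  unfold pvStep
  split_ifs with h
  · simp only [PySem.Set.mem_add, PySem.Set.mem_ofList, List.mem_map, List.mem_filter,
      Bool.and_eq_true, decide_eq_true_eq, beq_iff_eq]
    constructor
    · rintro (⟨j, ⟨⟨hj, hlt, hget⟩, rfl⟩⟩ | rfl)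
      · exact Or.inl ⟨j, hj, hlt, hget, rfl⟩
      · exact Or.inr ⟨h.1, h.2, rfl⟩
    · rintro (⟨j, hj, hlt, hget, rfl⟩ | ⟨_, _, rfl⟩)
      · exact Or.inl ⟨j, ⟨⟨hj, hlt, hget⟩, rfl⟩⟩
      · exact Or.inr rfl
  · simp only [PySem.Set.mem_ofList, List.mem_map, List.mem_filter,
      Bool.and_eq_true, decide_eq_true_eq, beq_iff_eq]
    constructor
    · rintro ⟨j, ⟨⟨hj, hlt, hget⟩, rfl⟩⟩
      exact Or.inl ⟨j, hj, hlt, hget, rfl⟩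
    · rintro (⟨j, hj, hlt, hget, rfl⟩ | ⟨hne, hget, rfl⟩)
      · exact ⟨j, ⟨⟨hj, hlt, hget⟩, rfl⟩⟩
      · exact absurd ⟨hne, hget⟩ h

-- growing the consumed prefix of emitted by one character
theorem pvQ_append (cs e : List Char) (ch : Char) (x : Int) :
    pvQ cs (e ++ [ch]) x ↔
      (∃ j, pvQ cs e j ∧ j < (cs.length : Int) ∧ PySem.List.pyGet? cs j = some ch ∧ x = j + 1) ∨
      (cs ≠ [] ∧ PySem.List.pyGet? cs 0 = some ch ∧ x = 1) := by
  constructor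
  · rintro ⟨n, rfl, h1, hc, he, htk⟩
    rw [List.length_append, List.length_singleton] at he htk
    obtain ⟨m, rfl⟩ : ∃ m, n = m + 1 := ⟨n - 1, by omega⟩
    have hd : e.length + 1 - (m + 1) ≤ e.length := by omega
    rw [List.drop_append_of_le_length hd] at htk
    have hm : m < cs.length := by omega
    rw [List.take_add_one, List.getElem?_eq_getElem hm] at htk
    have heq : e.length + 1 - (m + 1) = e.length - m := by omega
    rw [heq] at htk
    simp only [Option.toList_some] at htk
    obtain ⟨htk', hch⟩ := List.append_inj' htk rfl
    have hch' : cs[m]'hm = ch := by simpa using hch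
    rcases Nat.eq_zero_or_pos m with hm0 | hm1
    · subst hm0
      refine Or.inr ⟨List.length_pos_iff.mp hm, ?_, by norm_num⟩
      rw [show (0 : Int) = ((0 : Nat) : Int) by simp, PySem.List.pyGet?_natCast,
        List.getElem?_eq_getElem hm, hch']
    · refine Or.inl ⟨(m : Int), ⟨m, rfl, hm1, by omega, by omega, htk'⟩, by exact_mod_cast hm, ?_,
        by push_cast; ring⟩
      rw [PySem.List.pyGet?_natCast, List.getElem?_eq_getElem hm, hch']
  · rintro (⟨j, ⟨m, rfl, h1, hc, he, htk⟩, hlt, hget, rfl⟩ | ⟨hne, hget, rfl⟩)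
    · have hm : m < cs.length := by exact_mod_cast hlt
      rw [PySem.List.pyGet?_natCast, List.getElem?_eq_getElem hm] at hget
      refine ⟨m + 1, by push_cast; ring, by omega, by omega,
        by rw [List.length_append, List.length_singleton]; omega, ?_⟩
      rw [List.length_append, List.length_singleton,
        List.drop_append_of_le_length (by omega : e.length + 1 - (m + 1) ≤ e.length),
        show e.length + 1 - (m + 1) = e.length - m by omega,
        List.take_add_one, List.getElem?_eq_getElem hm, ← htk]
      simp only [Option.some_inj] at hget
      simp [hget]
    · have hm : 0 < cs.length := List.length_pos_iff.mpr hne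
      rw [show (0 : Int) = ((0 : Nat) : Int) by simp, PySem.List.pyGet?_natCast,
        List.getElem?_eq_getElem hm] at hget
      refine ⟨1, rfl, le_rfl, by omega, by simp, ?_⟩
      rw [List.length_append, List.length_singleton, Nat.add_sub_cancel,
        List.drop_append_of_le_length (le_rfl), List.drop_length, List.nil_append]
      rcases cs with _ | ⟨a, cs'⟩
      · simp at hm
      · simp only [Option.some_inj] at hget
        simpa [List.take] using hget

-- B's fold satisfies the invariant
theorem pvInv (c : List Char) (e : List Char) : ∀ (x : Int),
    x ∈ e.foldl (pvStep c) PySem.Set.empty ↔ pvQ c e x := by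
  induction e using List.reverseRecOn with
  | nil =>
    intro x
    constructor
    · intro h; exact absurd h (by simp [PySem.Set.empty])
    · rintro ⟨n, _, h1, _, he, _⟩; simp at he; omega
  | append_singleton e ch ih =>
    intro x
    rw [List.foldl_append, List.foldl_cons, List.foldl_nil, mem_pvStep, pvQ_append]
    constructor
    · rintro (⟨j, hj, hrest⟩ | hr)
      · exact Or.inl ⟨j, (ih j).mp hj, hrest⟩
      · exact Or.inr hr
    · rintro (⟨j, hj, hrest⟩ | hr)
      · exact Or.inl ⟨j, (ih j).mpr hj, hrest⟩
      · exact Or.inr hr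

-- the two predicates agree: "emitted ends with current[:n]" ↔ "current[:n] is emitted's suffix of length n"
theorem pvPointwise (c e : List Char) (n : Nat) (hn1 : n ≤ c.length) :
    (PySem.Chars.endswith e (c.take n) = true ↔ c.take n = e.drop (e.length - n)) := by
  rw [PySem.Chars.endswith_iff, List.suffix_iff_eq_drop, List.length_take,
    Nat.min_eq_left hn1]

-- B computes "drop the greatest overlap" too
theorem pvB_eq (p e : String) :
    resolve_stream_delta_alt p e =
      String.ofList ((p.toList).drop
        (Nat.findGreatest (fun k => PySem.Chars.endswith e.toList ((p.toList).take k) = true)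
          (min p.toList.length e.toList.length))) := by
  simp only [resolve_stream_delta_alt]
  set c := p.toList
  set eL := e.toList
  set live := eL.foldl (pvStep c) PySem.Set.empty with hlive
  set N := Nat.findGreatest (fun k => PySem.Chars.endswith eL (c.take k) = true)
    (min c.length eL.length) with hN
  have hchar : ∀ x : Int, x ∈ live ↔ ∃ n : Nat, x = (n : Int) ∧ 1 ≤ n ∧
      n ≤ min c.length eL.length ∧ PySem.Chars.endswith eL (c.take n) = true := by
    intro x
    rw [hlive, pvInv]
    unfold pvQ
    constructor
    · rintro ⟨n, rfl, h1, hc, he, ht⟩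
      exact ⟨n, rfl, h1, by omega, (pvPointwise c eL n hc).mpr ht⟩
    · rintro ⟨n, rfl, h1, hb, hP⟩
      exact ⟨n, rfl, h1, by omega, by omega, (pvPointwise c eL n (by omega)).mp hP⟩
  have hmd : PySem.List.maxD live (fun k => k) 0 = (N : Int) := by
    rcases eq_or_ne live [] with hl | hl
    · rw [hl, PySem.List.maxD_nil]
      have hN0 : N = 0 := by
        rw [hN, Nat.findGreatest_eq_zero_iff]
        intro n hn hb hP
        have : (n : Int) ∈ live := (hchar _).mpr ⟨n, rfl, hn, hb, hP⟩
        rw [hl] at this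
        exact absurd this (List.not_mem_nil)
      rw [hN0]; rfl
    · have hmem : PySem.List.maxD live (fun k => k) 0 ∈ live :=
        PySem.List.maxD_mem live (fun k => k) 0 hl
      obtain ⟨n, hEq, h1, hb, hP⟩ := (hchar _).mp hmem
      have hnN : n ≤ N := Nat.le_findGreatest hb hP
      have hPN : PySem.Chars.endswith eL (c.take N) = true := by
        rw [hN]; exact Nat.findGreatest_spec (P := fun k => PySem.Chars.endswith eL (c.take k) = true) hb hP
      have hNb : N ≤ min c.length eL.length := Nat.findGreatest_le _
      have hNmem : (N : Int) ∈ live :=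
        (hchar _).mpr ⟨N, rfl, by omega, hNb, hPN⟩
      have hle : (N : Int) ≤ PySem.List.maxD live (fun k => k) 0 :=
        PySem.List.max?_isMax (PySem.List.max?_eq_some_maxD live (fun k => k) 0 hl) _ hNmem
      rw [hEq] at hle ⊢
      have : n = N := by omega
      rw [this]
  rw [hmd, PySem.Chars.slice_eq_listSlice, PySem.List.slice_from_natCast]

-- ===== VERDICT (by name: the statement is the Claim_ definition above) =====
theorem resolve_stream_delta_spec : Claim_equal_resolve_stream_delta := by
  unfold Claim_equal_resolve_stream_delta Spec_resolve_stream_delta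
  intro p e _
  rw [pvA_eq, pvB_eq]
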